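-- pv_equiv track=rewrite | github.com/roadwide/AI-Homework | Search Algorithms/Astar/Astar_GUI/util.py | matrixList2text
-- ===== SOURCE A (Python) =====
-- import math
--
-- def matrixList2text(matrixList, cols=8):
--     if (len(matrixList) == 0): return ""
--     rows = math.ceil(len(matrixList) / cols)
--     text = ""
--     for i in range(rows):    # 一行3x3矩阵
--         for k in range(3):    # 一个3x3矩阵的3行
--             curr_cols = cols if i+1 < rows else len(matrixList) - cols*i
--             for j in range(curr_cols):    # 一行3x3矩阵中的一个
--                 idx = i * cols + j
--                 for l in range(3):    # 一个3x3矩阵的3列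
--                     text += str(matrixList[idx][k][l]) + " "
--                 text = text.rstrip(" ")
--                 text += "|"
--             text = text.rstrip("|")
--             text += "\n"
--         text += "-"*curr_cols*6+"\n"
--     text = text.rstrip("-"*curr_cols*6+"\n")
--     return text
-- ===== SOURCE B (Python) =====
-- def matrixList2text(matrixList, cols=8):
--     if not matrixList:
--         return ""
--     blocks = []
--     rest = matrixList
--     while rest:
--         chunk, rest = rest[:cols], rest[cols:]
--         lines = ["|".join(" ".join(str(m[k][l]) for l in range(3)) for m in chunk)
--                  for k in range(3)]
--         blocks.append("\n".join(lines))
--     return ("\n" + "-" * (6 * cols) + "\n").join(blocks)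
-- ===== Notes on version B (the rewrite author's own statement) =====
-- stated objective: simpler
-- what changed: Replaces A's incremental string accumulation with per-cell rstrip fix-ups across four nested index loops by chunking the matrix list, formatting each cell/line once, and assembling the grid with str.join over rows and blocks with a single separator between grid rows (no trailing-separator stripping needed).
import Mathlib
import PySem

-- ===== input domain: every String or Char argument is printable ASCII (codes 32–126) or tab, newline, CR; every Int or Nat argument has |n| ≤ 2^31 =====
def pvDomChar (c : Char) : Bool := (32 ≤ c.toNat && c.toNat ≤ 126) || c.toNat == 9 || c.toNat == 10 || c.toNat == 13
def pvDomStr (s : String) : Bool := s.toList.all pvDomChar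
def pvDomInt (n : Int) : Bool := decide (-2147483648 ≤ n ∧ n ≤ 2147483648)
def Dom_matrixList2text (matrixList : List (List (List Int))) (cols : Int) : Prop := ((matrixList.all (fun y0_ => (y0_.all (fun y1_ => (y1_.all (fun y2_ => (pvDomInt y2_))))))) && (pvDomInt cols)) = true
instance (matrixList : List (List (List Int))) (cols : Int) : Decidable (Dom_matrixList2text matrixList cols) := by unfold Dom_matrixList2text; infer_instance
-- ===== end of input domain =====

-- B reformats the grid by chunking the list and joining pre-formatted rows/blocks with separators
-- (a different decomposition, no incremental append/rstrip); equivalence is on the return value only.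

-- ===== PORT A =====
-- exact port of Python str.rstrip(chars): drop trailing characters that are in the set `chars`
def pvRstrip (cs : List Char) (chars : List Char) : List Char :=
  ((cs.reverse).dropWhile (fun c => chars.contains c)).reverse

-- the innermost 'for l in range(3)' loop: text += str(matrixList[idx][k][l]) + " "
def pvA_innerL (matrixList : List (List (List Int))) (idx k : Int) (text : List Char) : List Char :=
  (PySem.List.pyRange 0 3 1).foldl (fun text l =>
    -- matrixList[idx][k][l]; the pyGet? 'none' (IndexError) cases are excluded by Pre_, .getD is a totality default
    text ++ PySem.Int.toChars ((PySem.List.pyGet? ((PySem.List.pyGet? ((PySem.List.pyGet? matrixList idx).getD []) k).getD []) l).getD 0) ++ [' ']) text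

-- the 'for j in range(curr_cols)' loop
def pvA_innerJ (matrixList : List (List (List Int))) (cols i k curr_cols : Int) (text : List Char) : List Char :=
  (PySem.List.pyRange 0 curr_cols 1).foldl (fun text j =>
    pvRstrip (pvA_innerL matrixList (i * cols + j) k text) [' '] ++ ['|']) text

-- the 'for k in range(3)' loop; the state is (text, curr_cols)
def pvA_innerK (matrixList : List (List (List Int))) (cols rows n i : Int) (st : List Char × Int) : List Char × Int :=
  (PySem.List.pyRange 0 3 1).foldl (fun st k =>
    let curr_cols : Int := if i + 1 < rows then cols else n - cols * i
    (pvRstrip (pvA_innerJ matrixList cols i k curr_cols st.1) ['|'] ++ ['\n'], curr_cols)) st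

-- the 'for i in range(rows)' loop
def pvA_outer (matrixList : List (List (List Int))) (cols rows n : Int) (st : List Char × Int) : List Char × Int :=
  (PySem.List.pyRange 0 rows 1).foldl (fun st i =>
    let st := pvA_innerK matrixList cols rows n i st
    (st.1 ++ List.replicate (st.2.toNat * 6) '-' ++ ['\n'], st.2)) st

def matrixList2text (matrixList : List (List (List Int))) (cols : Int) : String :=
  if matrixList.length = 0 then "" else
  let n : Int := matrixList.length
  let rows : Int := -(PySem.Int.floordiv (-n) cols)  -- math.ceil(n / cols): exact ceiling division on these ints
  let st := pvA_outer matrixList cols rows n ([], 0)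
  String.ofList (pvRstrip st.1 (List.replicate (st.2.toNat * 6) '-' ++ ['\n']))

-- ===== PORT B =====
-- " ".join(str(m[k][l]) for l in range(3))
def pvFmtRow (m : List (List Int)) (k : Int) : List Char :=
  PySem.Chars.join [' '] ((PySem.List.pyRange 0 3 1).map (fun l =>
    PySem.Int.toChars ((PySem.List.pyGet? ((PySem.List.pyGet? m k).getD []) l).getD 0)))

-- the three text lines of one grid row of matrices, joined with '\n'
def pvBlock (chunk : List (List (List Int))) : List Char :=
  PySem.Chars.join ['\n'] ((PySem.List.pyRange 0 3 1).map (fun k =>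
    PySem.Chars.join ['|'] (chunk.map (fun m => pvFmtRow m k))))

-- the while loop 'chunk, rest = rest[:cols], rest[cols:]'; for cols ≥ 1 (Pre_),
-- xs.drop (c-1) = (x::xs).drop c, so this is exact; the c-1 form only makes the recursion structural
def pvChunks (c : Nat) : List (List (List Int)) → List (List (List (List Int)))
  | [] => []
  | x :: xs => ((x :: xs).take c) :: pvChunks c (xs.drop (c - 1))
termination_by l => l.length
decreasing_by simp

def matrixList2text_alt (matrixList : List (List (List Int))) (cols : Int) : String :=
  if matrixList = [] then "" else
  String.ofList (PySem.Chars.join ('\n' :: (List.replicate (6 * cols).toNat '-' ++ ['\n']))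
    ((pvChunks cols.toNat matrixList).map pvBlock))

-- ===== PRECONDITION & SPEC =====
-- Pre_ excludes inputs where A raises: cols < 1 on a nonempty list (ZeroDivisionError for cols = 0,
-- NameError on curr_cols for cols < 0) and matrices without a full 3×3 top-left block (IndexError).
def Pre_matrixList2text (matrixList : List (List (List Int))) (cols : Int) : Prop :=
  matrixList = [] ∨ (1 ≤ cols ∧ ∀ m ∈ matrixList, 3 ≤ m.length ∧ ∀ r ∈ m.take 3, 3 ≤ r.length)
instance (matrixList : List (List (List Int))) (cols : Int) : Decidable (Pre_matrixList2text matrixList cols) := by unfold Pre_matrixList2text; infer_instance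

def pvWitness_matrixList2text : List (List (List Int)) × Int :=
  ([[[1, 2, 3], [4, 5, 6], [7, 8, 9]], [[0, -1, 2], [3, 4, 5], [6, 7, 8]]], 8)

def Spec_matrixList2text (matrixList : List (List (List Int))) (cols : Int) (out : String) : Prop := out = matrixList2text_alt matrixList cols
instance (matrixList : List (List (List Int))) (cols : Int) (out : String) : Decidable (Spec_matrixList2text matrixList cols out) := by unfold Spec_matrixList2text; infer_instance

-- ===== CLAIM (what is proved, stated in full; the proofs are below) =====
def Claim_equal_matrixList2text : Prop := ∀ (matrixList : List (List (List Int))) (cols : Int), Dom_matrixList2text matrixList cols → Pre_matrixList2text matrixList cols → Spec_matrixList2text matrixList cols (matrixList2text matrixList cols)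

-- ===== LEMMAS AND PROOFS =====

-- grid row of up to c matrices, with its three text lines and its dash line, as A appends them
def pvGlue (chs : List (List (List (List Int)))) : List Char :=
  (chs.map (fun ch => pvBlock ch ++ '\n' :: (List.replicate (ch.length * 6) '-' ++ ['\n']))).flatten

-- length of the last chunk (= A's final curr_cols)
def pvLastLen (chs : List (List (List (List Int)))) : Int := ((chs.getLast?).getD []).length

-- `cs` ends in a decimal digit
def pvEndsDigit (cs : List Char) : Prop := ∃ d, cs.getLast? = some d ∧ d.isDigit = true

theorem pvToDigitsCore_append (b fuel n : Nat) (ds : List Char) :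
    ∃ pre, Nat.toDigitsCore b fuel n ds = pre ++ ds := by
  induction fuel generalizing n ds with
  | zero => exact ⟨[], rfl⟩
  | succ f ih =>
    rw [Nat.toDigitsCore]
    split
    · exact ⟨[(n % b).digitChar], rfl⟩
    · obtain ⟨p, hp⟩ := ih (n / b) ((n % b).digitChar :: ds)
      exact ⟨p ++ [(n % b).digitChar], by simpa using hp⟩

theorem pvDigitChar_isDigit (n : Nat) : ((n % 10).digitChar).isDigit = true := by
  have h : n % 10 < 10 := Nat.mod_lt _ (by norm_num)
  interval_cases h' : n % 10 <;> decide

theorem pvEndsDigit_toDigits (m : Nat) : pvEndsDigit (Nat.toDigits 10 m) := by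
  rw [Nat.toDigits, Nat.toDigitsCore]
  split
  · exact ⟨(m % 10).digitChar, rfl, pvDigitChar_isDigit m⟩
  · obtain ⟨p, hp⟩ := pvToDigitsCore_append 10 m (m / 10) [(m % 10).digitChar]
    exact ⟨(m % 10).digitChar, by rw [hp]; simp, pvDigitChar_isDigit m⟩

theorem pvEndsDigit_toChars (v : Int) : pvEndsDigit (PySem.Int.toChars v) := by
  rw [PySem.Int.toChars]
  split
  · obtain ⟨d, hd, hdig⟩ := pvEndsDigit_toDigits v.natAbs
    refine ⟨d, ?_, hdig⟩
    rcases h : Nat.toDigits 10 v.natAbs with _ | ⟨c, cs⟩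
    · rw [h] at hd; simp at hd
    · rw [h] at hd; simp [List.getLast?_cons_cons] at hd ⊢; exact hd
  · exact pvEndsDigit_toDigits v.toNat

theorem pvEndsDigit_append (s : List Char) {t : List Char} (h : pvEndsDigit t) :
    pvEndsDigit (s ++ t) := by
  obtain ⟨d, hd, hdig⟩ := h
  exact ⟨d, by rw [List.getLast?_append, hd]; rfl, hdig⟩

theorem pvEndsDigit_join (sep : List Char) :
    ∀ (l : List (List Char)), l ≠ [] → (∀ p ∈ l, pvEndsDigit p) →
      pvEndsDigit (PySem.Chars.join sep l) := by
  intro l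
  induction l with
  | nil => simp
  | cons a rest ih =>
    intro _ hall
    cases rest with
    | nil => rw [PySem.Chars.join_singleton]; exact hall a (by simp)
    | cons b r =>
      rw [PySem.Chars.join_cons_cons]
      exact pvEndsDigit_append _ (ih (by simp) (fun p hp => hall p (by simp [hp])))

theorem pvRstrip_append (xs ys bad : List Char)
    (h1 : ∀ y ∈ ys, bad.contains y = true)
    (h2 : ∀ d, xs.getLast? = some d → bad.contains d = false) :
    pvRstrip (xs ++ ys) bad = xs := by
  rw [pvRstrip, List.reverse_append, List.dropWhile_append]
  have hys : ys.reverse.dropWhile (fun c => bad.contains c) = [] := by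
    rw [List.dropWhile_eq_nil_iff]
    intro y hy; exact h1 y (by simpa using hy)
  rw [hys]
  simp only [List.isEmpty_nil, if_true]
  cases hxs : xs.reverse with
  | nil => simp [List.reverse_eq_nil_iff.mp hxs]
  | cons c cs =>
    have hlast : xs.getLast? = some c := by
      rw [← List.head?_reverse, hxs]; rfl
    rw [List.dropWhile_cons, h2 c hlast]
    simp [← hxs]

theorem pvDigit_contains_false (d : Char) (hd : d.isDigit = true) (bad : List Char)
    (hbad : ∀ c ∈ bad, c = ' ' ∨ c = '|' ∨ c = '-' ∨ c = '\n') :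
    bad.contains d = false := by
  by_contra h
  have htrue : bad.contains d = true := by revert h; cases bad.contains d <;> simp
  have hm : d ∈ bad := by simpa using htrue
  rcases hbad d hm with rfl | rfl | rfl | rfl <;> simp at hd

theorem pvPyRange_eq (curr : Int) :
    PySem.List.pyRange 0 curr 1 = (List.range curr.toNat).map (fun (k : Nat) => (k : Int)) := by
  simp only [PySem.List.pyRange]
  norm_num
  split
  · rw [List.map_eq_flatMap]
  · have : curr.toNat = 0 := by omega
    simp [this]

theorem pvPyRange3 : PySem.List.pyRange 0 3 1 = [0, 1, 2] := by decide

theorem pvPyRange_self (a : Int) : PySem.List.pyRange a a 1 = [] := by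
  simp [PySem.List.pyRange]

-- flattening blocks that each carry their trailing separator = join plus one trailing separator
theorem pvFlattenSep (sep : List Char) :
    ∀ (l : List (List Char)), l ≠ [] →
      (l.map (· ++ sep)).flatten = PySem.Chars.join sep l ++ sep := by
  intro l
  induction l with
  | nil => simp
  | cons a rest ih =>
    intro _
    cases rest with
    | nil => simp [PySem.Chars.join_singleton]
    | cons b r =>
      rw [List.map_cons, List.flatten_cons, ih (by simp), PySem.Chars.join_cons_cons]
      simp [List.append_assoc]

theorem pvEndsDigit_fmtRow (m : List (List Int)) (k : Int) : pvEndsDigit (pvFmtRow m k) := by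
  rw [pvFmtRow, pvPyRange3]
  apply pvEndsDigit_join _ _ (by simp)
  intro p hp
  simp only [List.map_cons, List.map_nil, List.mem_cons, List.not_mem_nil, or_false] at hp
  rcases hp with rfl | rfl | rfl <;> exact pvEndsDigit_toChars _

theorem pvCellA (ml : List (List (List Int))) (idx k : Int) (text : List Char) :
    pvA_innerL ml idx k text
      = text ++ (pvFmtRow ((PySem.List.pyGet? ml idx).getD []) k ++ [' ']) := by
  rw [pvA_innerL, pvFmtRow, pvPyRange3]
  simp [PySem.Chars.join_cons_cons, PySem.Chars.join_singleton]

theorem pvStripCell (text : List Char) (m : List (List Int)) (k : Int) :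
    pvRstrip (text ++ (pvFmtRow m k ++ [' '])) [' '] = text ++ pvFmtRow m k := by
  rw [← List.append_assoc]
  apply pvRstrip_append
  · intro y hy; simp at hy; simp [hy]
  · intro d hd
    obtain ⟨e, he, hdig⟩ := pvEndsDigit_append text (pvEndsDigit_fmtRow m k)
    rw [hd] at he
    cases he
    exact pvDigit_contains_false _ hdig _ (by intro c hc; simp at hc; tauto)

theorem pvJloopAux (ml : List (List (List Int))) (base : Int) (k : Int) (hb : 0 ≤ base) :
    ∀ (cnt : Nat) (text : List Char), base.toNat + cnt ≤ ml.length →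
      (List.range cnt).foldl
          (fun (text : List Char) (j : Nat) =>
            pvRstrip (pvA_innerL ml (base + (j : Int)) k text) [' '] ++ ['|']) text
        = text ++ (((ml.drop base.toNat).take cnt).map (fun m => pvFmtRow m k ++ ['|'])).flatten := by
  intro cnt
  induction cnt with
  | zero => intro text h; simp
  | succ m ih =>
    intro text h
    rw [List.range_succ, List.foldl_append, ih text (by omega)]
    simp only [List.foldl_cons, List.foldl_nil]
    have hcast : base + (m : Int) = ((base.toNat + m : Nat) : Int) := by omega
    have hlt : base.toNat + m < ml.length := by omega
    rw [pvCellA, hcast, PySem.List.pyGet?_natCast, List.getElem?_eq_getElem hlt]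
    simp only [Option.getD_some]
    rw [pvStripCell]
    rw [List.take_succ, List.getElem?_drop, List.getElem?_eq_getElem hlt]
    simp [List.append_assoc]

theorem pvJloop (ml : List (List (List Int))) (cols i k curr : Int) (text : List Char)
    (hb : 0 ≤ i * cols) (h1 : 1 ≤ curr)
    (hle : (i * cols).toNat + curr.toNat ≤ ml.length) :
    pvA_innerJ ml cols i k curr text
      = text ++ (PySem.Chars.join ['|']
          (((ml.drop (i * cols).toNat).take curr.toNat).map (fun m => pvFmtRow m k)) ++ ['|']) := by
  rw [pvA_innerJ, pvPyRange_eq, List.foldl_map,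
      pvJloopAux ml (i * cols) k hb curr.toNat text hle]
  have hne : ((ml.drop (i * cols).toNat).take curr.toNat).map (fun m => pvFmtRow m k) ≠ [] := by
    apply List.ne_nil_of_length_pos
    simp only [List.length_map, List.length_take, List.length_drop]
    omega
  have : ((ml.drop (i * cols).toNat).take curr.toNat).map (fun m => pvFmtRow m k ++ ['|'])
      = (((ml.drop (i * cols).toNat).take curr.toNat).map (fun m => pvFmtRow m k)).map (· ++ ['|']) := by
    rw [List.map_map]; rfl
  rw [this, pvFlattenSep _ _ hne]

theorem pvLineEndsDigit (chunk : List (List (List Int))) (k : Int) (h : chunk ≠ []) :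
    pvEndsDigit (PySem.Chars.join ['|'] (chunk.map (fun m => pvFmtRow m k))) := by
  apply pvEndsDigit_join _ _ (by simpa using h)
  intro p hp
  obtain ⟨m, -, rfl⟩ := List.mem_map.mp hp
  exact pvEndsDigit_fmtRow m k

theorem pvStripLine (text : List Char) (chunk : List (List (List Int))) (k : Int)
    (h : chunk ≠ []) :
    pvRstrip (text ++ (PySem.Chars.join ['|'] (chunk.map (fun m => pvFmtRow m k)) ++ ['|'])) ['|']
      = text ++ PySem.Chars.join ['|'] (chunk.map (fun m => pvFmtRow m k)) := by
  rw [← List.append_assoc]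
  apply pvRstrip_append
  · intro y hy; simp at hy; simp [hy]
  · intro d hd
    obtain ⟨e, he, hdig⟩ := pvEndsDigit_append text (pvLineEndsDigit chunk k h)
    rw [hd] at he
    cases he
    exact pvDigit_contains_false _ hdig _ (by intro c hc; simp at hc; tauto)

theorem pvKloop (ml : List (List (List Int))) (cols rows n i : Int)
    (text : List Char) (cc curr : Int)
    (hcurr : curr = if i + 1 < rows then cols else n - cols * i)
    (hb : 0 ≤ i * cols) (h1 : 1 ≤ curr)
    (hle : (i * cols).toNat + curr.toNat ≤ ml.length) :
    pvA_innerK ml cols rows n i (text, cc)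
      = (text ++ (pvBlock ((ml.drop (i * cols).toNat).take curr.toNat) ++ ['\n']), curr) := by
  have hchne : (ml.drop (i * cols).toNat).take curr.toNat ≠ [] := by
    apply List.ne_nil_of_length_pos
    simp only [List.length_take, List.length_drop]
    omega
  rw [pvA_innerK, pvPyRange3]
  simp only [List.foldl_cons, List.foldl_nil, ← hcurr]
  rw [pvJloop ml cols i 0 curr text hb h1 hle, pvStripLine _ _ _ hchne,
      pvJloop ml cols i 1 curr _ hb h1 hle, pvStripLine _ _ _ hchne,
      pvJloop ml cols i 2 curr _ hb h1 hle, pvStripLine _ _ _ hchne]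
  rw [pvBlock, pvPyRange3]
  simp [PySem.Chars.join_cons_cons, PySem.Chars.join_singleton, List.append_assoc]

theorem pvChunks_cons (c : Nat) (hc : 1 ≤ c) (ml : List (List (List Int))) (h : ml ≠ []) :
    pvChunks c ml = ml.take c :: pvChunks c (ml.drop c) := by
  obtain ⟨c', rfl⟩ : ∃ c', c = c' + 1 := ⟨c - 1, by omega⟩
  cases ml with
  | nil => exact absurd rfl h
  | cons x xs =>
    rw [pvChunks, List.drop_succ_cons]
    simp

theorem pvChunks_ne_nil (c : Nat) (ml : List (List (List Int))) (h : ml ≠ []) :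
    pvChunks c ml ≠ [] := by
  cases ml with
  | nil => exact absurd rfl h
  | cons x xs => rw [pvChunks]; simp

theorem pvOuterAux (ml : List (List (List Int))) (cols n rows : Int)
    (hc : 1 ≤ cols) (hn : n = ml.length)
    (hup : n ≤ cols * rows) (hlow : cols * (rows - 1) < n) :
    ∀ (r : Nat) (i0 : Int) (text : List Char) (cc : Int),
      0 ≤ i0 → rows = i0 + r → 1 ≤ r → cols * i0 < n →
      (PySem.List.pyRange i0 rows 1).foldl (fun st i =>
          let st := pvA_innerK ml cols rows n i st
          (st.1 ++ List.replicate (st.2.toNat * 6) '-' ++ ['\n'], st.2)) (text, cc)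
        = (text ++ pvGlue (pvChunks cols.toNat (ml.drop (i0 * cols).toNat)),
           pvLastLen (pvChunks cols.toNat (ml.drop (i0 * cols).toNat))) := by
  intro r
  induction r with
  | zero => intro i0 text cc _ _ h1 _; omega
  | succ r ih =>
    intro i0 text cc hi0 hrows h1 hcov
    have hi0rows : i0 < rows := by omega
    rw [PySem.List.pyRange_one_cons hi0rows]
    rw [List.foldl_cons]
    by_cases hlast : r = 0
    · -- last grid row: curr_cols = n - cols*i0
      subst hlast
      have hr1 : rows = i0 + 1 := by omega
      have hcurr : (n - cols * i0) = if i0 + 1 < rows then cols else n - cols * i0 := by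
        rw [if_neg (by omega)]
      have hb : 0 ≤ i0 * cols := by positivity
      have hcle : n - cols * i0 ≤ cols := by nlinarith [hlow]
      have h1c : 1 ≤ n - cols * i0 := by omega
      have hmul : i0 * cols = cols * i0 := by ring
      have hle : (i0 * cols).toNat + (n - cols * i0).toNat ≤ ml.length := by
        rw [hmul]; omega
      rw [pvKloop ml cols rows n i0 text cc (n - cols * i0) hcurr hb h1c hle]
      simp only []
      have hsuffix : (ml.drop (i0 * cols).toNat).take (n - cols * i0).toNat
          = ml.drop (i0 * cols).toNat := by
        apply List.take_of_length_le
        simp only [List.length_drop]; omega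
      have hslen : (ml.drop (i0 * cols).toNat).length = (n - cols * i0).toNat := by
        simp only [List.length_drop]; rw [hmul]; omega
      have hsne : ml.drop (i0 * cols).toNat ≠ [] := by
        apply List.ne_nil_of_length_pos; omega
      have hchunks : pvChunks cols.toNat (ml.drop (i0 * cols).toNat)
          = [ml.drop (i0 * cols).toNat] := by
        rw [pvChunks_cons cols.toNat (by omega) _ hsne]
        have ht : (ml.drop (i0 * cols).toNat).take cols.toNat = ml.drop (i0 * cols).toNat := by
          apply List.take_of_length_le; omega
        have hd : (ml.drop (i0 * cols).toNat).drop cols.toNat = [] := by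
          apply List.eq_nil_of_length_eq_zero; simp only [List.length_drop]; omega
        rw [ht, hd]; simp [pvChunks]
      rw [hr1, pvPyRange_self, List.foldl_nil, hsuffix, hchunks]
      simp only [Prod.mk.injEq]
      refine ⟨?_, ?_⟩
      · simp [pvGlue, hslen, List.append_assoc]
      · simp only [pvLastLen, List.getLast?_singleton, Option.getD_some, hslen]
        omega
    · -- not the last grid row: curr_cols = cols
      have hi1 : i0 + 1 < rows := by omega
      have hcurr : cols = if i0 + 1 < rows then cols else n - cols * i0 := by
        rw [if_pos hi1]
      have hb : 0 ≤ i0 * cols := by positivity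
      have hmul : i0 * cols = cols * i0 := by ring
      have hfull : cols * (i0 + 1) < n := by nlinarith [hlow]
      have hle : (i0 * cols).toNat + cols.toNat ≤ ml.length := by
        rw [hmul]
        have : cols * i0 + cols = cols * (i0 + 1) := by ring
        omega
      rw [pvKloop ml cols rows n i0 text cc cols hcurr hb hc hle]
      simp only []
      rw [ih (i0 + 1) _ _ (by omega) (by omega) (by omega) hfull]
      have hslen : (ml.drop (i0 * cols).toNat).length = (n - cols * i0).toNat := by
        simp only [List.length_drop]; rw [hmul]; omega
      have hsne : ml.drop (i0 * cols).toNat ≠ [] := by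
        apply List.ne_nil_of_length_pos; omega
      have hdropdrop : (ml.drop (i0 * cols).toNat).drop cols.toNat
          = ml.drop ((i0 + 1) * cols).toNat := by
        rw [List.drop_drop]
        congr 1
        have : (i0 + 1) * cols = i0 * cols + cols := by ring
        omega
      have hchunks : pvChunks cols.toNat (ml.drop (i0 * cols).toNat)
          = (ml.drop (i0 * cols).toNat).take cols.toNat
            :: pvChunks cols.toNat (ml.drop ((i0 + 1) * cols).toNat) := by
        rw [pvChunks_cons cols.toNat (by omega) _ hsne, hdropdrop]
      have hclen : ((ml.drop (i0 * cols).toNat).take cols.toNat).length = cols.toNat := by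
        simp only [List.length_take]; omega
      have hrest_ne : pvChunks cols.toNat (ml.drop ((i0 + 1) * cols).toNat) ≠ [] := by
        apply pvChunks_ne_nil
        apply List.ne_nil_of_length_pos
        simp only [List.length_drop]
        have : ((i0 + 1) * cols).toNat < ml.length := by
          have : (i0 + 1) * cols = cols * (i0 + 1) := by ring
          omega
        omega
      rw [hchunks]
      simp only [Prod.mk.injEq]
      refine ⟨?_, ?_⟩
      · simp only [pvGlue, List.map_cons, List.flatten_cons, hclen]
        simp [List.append_assoc]
      · cases hch : pvChunks cols.toNat (ml.drop ((i0 + 1) * cols).toNat) with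
        | nil => exact absurd hch hrest_ne
        | cons ch rest => simp [pvLastLen, List.getLast?_cons_cons]
  
theorem pvGlueJoin (c : Nat) (hc : 1 ≤ c) :
    ∀ (N : Nat) (ml : List (List (List Int))), ml.length ≤ N → ml ≠ [] →
      pvGlue (pvChunks c ml)
        = PySem.Chars.join ('\n' :: (List.replicate (6 * c) '-' ++ ['\n']))
            ((pvChunks c ml).map pvBlock)
          ++ ('\n' :: (List.replicate ((pvLastLen (pvChunks c ml)).toNat * 6) '-' ++ ['\n'])) := by
  intro N
  induction N with
  | zero => intro ml h hne; interval_cases h2 : ml.length; simp_all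
  | succ N ih =>
    intro ml hlen hne
    rw [pvChunks_cons c hc ml hne]
    by_cases hrest : ml.drop c = []
    · have h0 : (ml.drop c).length = 0 := by rw [hrest]; rfl
      simp only [List.length_drop] at h0
      have htake : ml.take c = ml := List.take_of_length_le (by omega)
      rw [hrest, htake]
      have hnil : pvChunks c ([] : List (List (List Int))) = [] := by simp [pvChunks]
      rw [hnil, pvGlue, pvLastLen]
      simp [PySem.Chars.join_singleton]
    · have hlenc : c < ml.length := by
        by_contra hx
        exact hrest (List.eq_nil_of_length_eq_zero (by simp only [List.length_drop]; omega))
      have hrest_ne : pvChunks c (ml.drop c) ≠ [] := pvChunks_ne_nil c _ hrest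
      have ihr := ih (ml.drop c) (by simp only [List.length_drop]; omega) hrest
      rw [pvGlue] at ihr ⊢
      simp only [List.map_cons, List.flatten_cons]
      rw [ihr]
      have hclen : (ml.take c).length = c := by simp only [List.length_take]; omega
      cases hch : pvChunks c (ml.drop c) with
      | nil => exact absurd hch hrest_ne
      | cons ch rest =>
        rw [List.map_cons, PySem.Chars.join_cons_cons, ← List.map_cons]
        simp only [pvLastLen, List.getLast?_cons_cons, hclen]
        have hmc : 6 * c = c * 6 := by ring
        rw [hmc]
        simp [List.append_assoc]
      
theorem pvBlockEndsDigit (ch : List (List (List Int))) (h : ch ≠ []) :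
    pvEndsDigit (pvBlock ch) := by
  rw [pvBlock, pvPyRange3]
  apply pvEndsDigit_join _ _ (by simp)
  intro p hp
  simp only [List.map_cons, List.map_nil, List.mem_cons, List.not_mem_nil, or_false] at hp
  rcases hp with rfl | rfl | rfl <;> exact pvLineEndsDigit ch _ h

theorem pvChunks_mem_ne_nil (c : Nat) (hc : 1 ≤ c) :
    ∀ (N : Nat) (l : List (List (List Int))), l.length ≤ N → ∀ ch ∈ pvChunks c l, ch ≠ [] := by
  intro N
  induction N with
  | zero =>
    intro l h ch hch
    cases l with
    | nil => simp [pvChunks] at hch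
    | cons x xs => simp at h
  | succ N ih =>
    intro l h ch hch
    cases l with
    | nil => simp [pvChunks] at hch
    | cons x xs =>
      rw [pvChunks_cons c hc _ (by simp)] at hch
      rcases List.mem_cons.mp hch with rfl | hch'
      · obtain ⟨c', rfl⟩ : ∃ c', c = c' + 1 := ⟨c - 1, by omega⟩
        simp
      · exact ih _ (by simp at h ⊢; omega) ch hch'

-- ===== VERDICT (by name: the statement is the Claim_ definition above) =====
theorem matrixList2text_spec : Claim_equal_matrixList2text := by
  unfold Claim_equal_matrixList2text
  intro ml cols _ hpre
  unfold Spec_matrixList2text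
  by_cases hml : ml = []
  · subst hml; simp [matrixList2text, matrixList2text_alt]
  · have hc : 1 ≤ cols := by
      rcases hpre with rfl | ⟨hc, -⟩
      · exact absurd rfl hml
      · exact hc
    have hn1 : 0 < ml.length := List.length_pos_iff.mpr hml
    rw [matrixList2text, if_neg (by omega)]
    simp only []
    set n : Int := (ml.length : Int) with hn
    set rows : Int := -(PySem.Int.floordiv (-n) cols) with hrows
    -- rows = ceil(n / cols): cols*(rows-1) < n ≤ cols*rows
    have hfd : PySem.Int.floordiv (-n) cols = (-n) / cols := by
      rw [PySem.Int.floordiv, Int.fdiv_eq_ediv, if_pos (Or.inl (by omega))]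
      ring
    have hdm := Int.ediv_add_emod (-n) cols
    have hr0 : 0 ≤ (-n) % cols := Int.emod_nonneg _ (by omega)
    have hrlt : (-n) % cols < cols := Int.emod_lt_of_pos _ (by omega)
    have hup : n ≤ cols * rows := by
      have h1 : cols * rows = -(cols * ((-n) / cols)) := by rw [hrows, hfd]; ring
      omega
    have hlow : cols * (rows - 1) < n := by
      have h1 : cols * (rows - 1) = -(cols * ((-n) / cols)) - cols := by rw [hrows, hfd]; ring
      omega
    have hrpos : 1 ≤ rows := by nlinarith [hup]
    have houter := pvOuterAux ml cols n rows hc hn hup hlow rows.toNat 0 [] 0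
      le_rfl (by omega) (by omega) (by omega)
    rw [show ((0 : Int) * cols).toNat = 0 from by simp, List.drop_zero] at houter
    rw [pvA_outer, houter]
    -- the text before the final rstrip = B's joined blocks ++ one trailing separator
    set chunks := pvChunks cols.toNat ml with hchunks
    have hchne : chunks ≠ [] := pvChunks_ne_nil _ _ hml
    have hchmem : ∀ ch ∈ chunks, ch ≠ [] :=
      pvChunks_mem_ne_nil cols.toNat (by omega) ml.length ml le_rfl
    have hglue := pvGlueJoin cols.toNat (by omega) ml.length ml le_rfl hml
    rw [← hchunks] at hglue
    rw [hglue]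
    have hlast1 : 1 ≤ (pvLastLen chunks).toNat := by
      have hl := List.getLast_mem hchne
      have hsome : chunks.getLast? = some (chunks.getLast hchne) := List.getLast?_eq_getLast hchne
      have := hchmem _ hl
      rw [pvLastLen, hsome]
      simp only [Option.getD_some]
      have : 0 < (chunks.getLast hchne).length := List.length_pos_iff.mpr this
      omega
    have hstrip : pvRstrip
        (PySem.Chars.join ('\n' :: (List.replicate (6 * cols.toNat) '-' ++ ['\n'])) (chunks.map pvBlock)
          ++ ('\n' :: (List.replicate ((pvLastLen chunks).toNat * 6) '-' ++ ['\n'])))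
        (List.replicate ((pvLastLen chunks).toNat * 6) '-' ++ ['\n'])
        = PySem.Chars.join ('\n' :: (List.replicate (6 * cols.toNat) '-' ++ ['\n'])) (chunks.map pvBlock) := by
      apply pvRstrip_append
      · intro y hy
        have hy' : y = '-' ∨ y = '\n' := by
          rcases List.mem_cons.mp hy with rfl | hy2
          · right; rfl
          · rcases List.mem_append.mp hy2 with h3 | h3
            · left; exact (List.mem_replicate.mp h3).2
            · right; simp at h3; exact h3
        rcases hy' with rfl | rfl
        · have : '-' ∈ List.replicate ((pvLastLen chunks).toNat * 6) '-' ++ ['\n'] := by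
            apply List.mem_append_left
            exact List.mem_replicate.mpr ⟨by omega, rfl⟩
          simpa [List.contains_iff_mem] using this
        · have : '\n' ∈ List.replicate ((pvLastLen chunks).toNat * 6) '-' ++ ['\n'] := by
            simp
          simpa [List.contains_iff_mem] using this
      · intro d hd
        have hje : pvEndsDigit (PySem.Chars.join ('\n' :: (List.replicate (6 * cols.toNat) '-' ++ ['\n'])) (chunks.map pvBlock)) := by
          apply pvEndsDigit_join _ _ (by simpa using hchne)
          intro p hp
          obtain ⟨ch, hch, rfl⟩ := List.mem_map.mp hp
          exact pvBlockEndsDigit ch (hchmem ch hch)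
        obtain ⟨e, he, hdig⟩ := hje
        rw [hd] at he
        cases he
        apply pvDigit_contains_false _ hdig
        intro c hcmem
        rcases List.mem_append.mp hcmem with h3 | h3
        · right; right; left; exact (List.mem_replicate.mp h3).2
        · right; right; right; simpa using h3
    simp only [List.nil_append]
    rw [hstrip]
    rw [matrixList2text_alt, if_neg hml]
    have hsep : (6 * cols).toNat = 6 * cols.toNat := by omega
    rw [hsep]
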